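-- pv_equiv track=rewrite | github.com/HardisonCo/HMS-A2A | src/agents/specialized/education/tools.py | _generate_performance_descriptors
-- ===== SOURCE A (Python) =====
-- def _generate_performance_descriptors(criterion, level_labels, assignment_type, grade_level):
--     """Helper method to generate performance descriptors for a criterion."""
--     descriptors = {}
--
--     # Customize descriptors based on criterion
--     if criterion == "Content/Ideas" or criterion == "Content":
--         for i, label in enumerate(level_labels):
--             if i == 0:  # Lowest level
--                 descriptors[label] = "Content is minimal, inaccurate, or irrelevant to the assignment"
--             elif i == len(level_labels) - 1:  # Highest level
--                 descriptors[label] = "Content is comprehensive, accurate, insightful, and exceeds expectations"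
--             elif i == 1 and len(level_labels) > 2:  # Second level
--                 descriptors[label] = "Content is partially developed with some inaccuracies or irrelevance"
--             elif i == len(level_labels) - 2:  # Second highest level
--                 descriptors[label] = "Content is thorough, accurate, and relevant to the assignment"
--             else:  # Middle levels
--                 descriptors[label] = "Content is mostly accurate and relevant with adequate development"
--
--     elif criterion == "Organization":
--         for i, label in enumerate(level_labels):
--             if i == 0:  # Lowest level
--                 descriptors[label] = "Organization is unclear, illogical, or ineffective"
--             elif i == len(level_labels) - 1:  # Highest level
--                 descriptors[label] = "Organization is clear, logical, and enhances the effectiveness of the work"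
--             elif i == 1 and len(level_labels) > 2:  # Second level
--                 descriptors[label] = "Organization shows some structure but may be inconsistent or confusing"
--             elif i == len(level_labels) - 2:  # Second highest level
--                 descriptors[label] = "Organization is clear and logical throughout most of the work"
--             else:  # Middle levels
--                 descriptors[label] = "Organization is generally clear with some minor logical inconsistencies"
--
--     elif criterion == "Evidence/Support" or criterion == "Evidence":
--         for i, label in enumerate(level_labels):
--             if i == 0:  # Lowest level
--                 descriptors[label] = "Little or no relevant evidence provided to support ideas"
--             elif i == len(level_labels) - 1:  # Highest level
--                 descriptors[label] = "Comprehensive, relevant evidence that strongly supports and enhances ideas"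
--             elif i == 1 and len(level_labels) > 2:  # Second level
--                 descriptors[label] = "Some evidence provided but may be limited, irrelevant, or misinterpreted"
--             elif i == len(level_labels) - 2:  # Second highest level
--                 descriptors[label] = "Sufficient, relevant evidence that effectively supports ideas"
--             else:  # Middle levels
--                 descriptors[label] = "Adequate evidence provided that generally supports ideas"
--
--     else:
--         # Generic descriptors for other criteria
--         for i, label in enumerate(level_labels):
--             if i == 0:  # Lowest level
--                 descriptors[label] = f"{criterion} shows minimal competence or significant errors"
--             elif i == len(level_labels) - 1:  # Highest level
--                 descriptors[label] = f"{criterion} demonstrates exceptional skill and comprehensive understanding"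
--             elif i == 1 and len(level_labels) > 2:  # Second level
--                 descriptors[label] = f"{criterion} shows developing competence with notable errors or gaps"
--             elif i == len(level_labels) - 2:  # Second highest level
--                 descriptors[label] = f"{criterion} demonstrates proficient skill and solid understanding"
--             else:  # Middle levels
--                 descriptors[label] = f"{criterion} shows adequate competence with some minor errors"
--
--     return descriptors
-- ===== SOURCE B (Python) =====
-- # B: build the whole descriptor sequence for n levels by concatenating segments
-- # (low, optional second-low, repeated middle, optional second-high, high) and zip it
-- # with the labels -- no per-index branching at all.
--
-- _TABLE = {
--     "Content": (
--         "Content is minimal, inaccurate, or irrelevant to the assignment",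
--         "Content is partially developed with some inaccuracies or irrelevance",
--         "Content is mostly accurate and relevant with adequate development",
--         "Content is thorough, accurate, and relevant to the assignment",
--         "Content is comprehensive, accurate, insightful, and exceeds expectations",
--     ),
--     "Organization": (
--         "Organization is unclear, illogical, or ineffective",
--         "Organization shows some structure but may be inconsistent or confusing",
--         "Organization is generally clear with some minor logical inconsistencies",
--         "Organization is clear and logical throughout most of the work",
--         "Organization is clear, logical, and enhances the effectiveness of the work",
--     ),
--     "Evidence": (
--         "Little or no relevant evidence provided to support ideas",
--         "Some evidence provided but may be limited, irrelevant, or misinterpreted",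
--         "Adequate evidence provided that generally supports ideas",
--         "Sufficient, relevant evidence that effectively supports ideas",
--         "Comprehensive, relevant evidence that strongly supports and enhances ideas",
--     ),
-- }
--
-- _GENERIC = (
--     " shows minimal competence or significant errors",
--     " shows developing competence with notable errors or gaps",
--     " shows adequate competence with some minor errors",
--     " demonstrates proficient skill and solid understanding",
--     " demonstrates exceptional skill and comprehensive understanding",
-- )
--
-- _ALIAS = {"Content/Ideas": "Content", "Evidence/Support": "Evidence"}
--
--
-- def _five_descriptors(criterion):
--     key = _ALIAS.get(criterion, criterion)
--     if key in _TABLE: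
--         return _TABLE[key]
--     return tuple(criterion + suffix for suffix in _GENERIC)
--
--
-- def _generate_performance_descriptors(criterion, level_labels, assignment_type, grade_level):
--     lo, slo, mid, shi, hi = _five_descriptors(criterion)
--     n = len(level_labels)
--     if n == 0:
--         seq = []
--     elif n == 1:
--         seq = [lo]
--     else:
--         seq = [lo] + [slo] * (n > 2) + [mid] * max(n - 4, 0) + [shi] * (n > 3) + [hi]
--     return dict(zip(level_labels, seq))
-- ===== Notes on version B (the rewrite author's own statement) =====
-- stated objective: alternative
-- what changed: A walks the labels and picks each descriptor with a five-way positional if/elif chain repeated in four copy-pasted loops; B instead builds the entire descriptor sequence for n levels at once by concatenating segments (lowest + optional second-lowest + (n-4) middles + optional second-highest + highest) from a per-criterion table and zips it with the labels, so no per-index branching occurs.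
import Mathlib
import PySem

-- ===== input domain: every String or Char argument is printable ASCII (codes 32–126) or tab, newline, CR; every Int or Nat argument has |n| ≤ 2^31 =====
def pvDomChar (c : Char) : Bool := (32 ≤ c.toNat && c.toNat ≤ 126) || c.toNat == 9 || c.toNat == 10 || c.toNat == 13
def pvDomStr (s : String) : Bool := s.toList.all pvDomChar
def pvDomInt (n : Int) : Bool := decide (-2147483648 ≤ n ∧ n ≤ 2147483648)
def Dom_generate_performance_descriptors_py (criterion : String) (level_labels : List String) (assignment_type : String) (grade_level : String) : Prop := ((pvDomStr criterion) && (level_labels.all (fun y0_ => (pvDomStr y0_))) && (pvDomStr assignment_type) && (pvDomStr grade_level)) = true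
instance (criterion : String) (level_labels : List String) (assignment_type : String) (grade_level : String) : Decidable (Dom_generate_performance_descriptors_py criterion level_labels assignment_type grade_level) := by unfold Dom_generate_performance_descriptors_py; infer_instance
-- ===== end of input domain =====

-- B replaces A's four copy-pasted five-way if/elif loops by building the whole n-level
-- descriptor sequence as a concatenation of segments and zipping it with the labels
-- (objective: alternative decomposition). Return-value equivalence only.

-- ===== PORT A =====
-- literal transliteration: four separate loops, each with the same five-way if/elif chain
def generate_performance_descriptors_py (criterion : String) (level_labels : List String) (_assignment_type : String) (_grade_level : String) : List (String × String) :=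
  let n : Int := level_labels.length
  let descriptors : PySem.Dict String String := PySem.Dict.empty
  let descriptors :=
    if criterion = "Content/Ideas" ∨ criterion = "Content" then
      (PySem.List.enumerate level_labels).foldl (fun d p =>
        d.insert p.2
          (if p.1 = 0 then "Content is minimal, inaccurate, or irrelevant to the assignment"
           else if p.1 = n - 1 then "Content is comprehensive, accurate, insightful, and exceeds expectations"
           else if p.1 = 1 ∧ n > 2 then "Content is partially developed with some inaccuracies or irrelevance"
           else if p.1 = n - 2 then "Content is thorough, accurate, and relevant to the assignment"
           else "Content is mostly accurate and relevant with adequate development")) descriptors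
    else if criterion = "Organization" then
      (PySem.List.enumerate level_labels).foldl (fun d p =>
        d.insert p.2
          (if p.1 = 0 then "Organization is unclear, illogical, or ineffective"
           else if p.1 = n - 1 then "Organization is clear, logical, and enhances the effectiveness of the work"
           else if p.1 = 1 ∧ n > 2 then "Organization shows some structure but may be inconsistent or confusing"
           else if p.1 = n - 2 then "Organization is clear and logical throughout most of the work"
           else "Organization is generally clear with some minor logical inconsistencies")) descriptors
    else if criterion = "Evidence/Support" ∨ criterion = "Evidence" then
      (PySem.List.enumerate level_labels).foldl (fun d p =>
        d.insert p.2
          (if p.1 = 0 then "Little or no relevant evidence provided to support ideas"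
           else if p.1 = n - 1 then "Comprehensive, relevant evidence that strongly supports and enhances ideas"
           else if p.1 = 1 ∧ n > 2 then "Some evidence provided but may be limited, irrelevant, or misinterpreted"
           else if p.1 = n - 2 then "Sufficient, relevant evidence that effectively supports ideas"
           else "Adequate evidence provided that generally supports ideas")) descriptors
    else
      (PySem.List.enumerate level_labels).foldl (fun d p =>
        d.insert p.2
          (if p.1 = 0 then criterion ++ " shows minimal competence or significant errors"
           else if p.1 = n - 1 then criterion ++ " demonstrates exceptional skill and comprehensive understanding"
           else if p.1 = 1 ∧ n > 2 then criterion ++ " shows developing competence with notable errors or gaps"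
           else if p.1 = n - 2 then criterion ++ " demonstrates proficient skill and solid understanding"
           else criterion ++ " shows adequate competence with some minor errors")) descriptors
  descriptors.items

-- ===== PORT B =====
-- the five descriptors (lowest, second-lowest, middle, second-highest, highest) for a criterion
def pvFive (criterion : String) : String × String × String × String × String :=
  let key := if criterion = "Content/Ideas" then "Content"
             else if criterion = "Evidence/Support" then "Evidence"
             else criterion
  if key = "Content" then
    ("Content is minimal, inaccurate, or irrelevant to the assignment",
     "Content is partially developed with some inaccuracies or irrelevance",
     "Content is mostly accurate and relevant with adequate development",
     "Content is thorough, accurate, and relevant to the assignment",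
     "Content is comprehensive, accurate, insightful, and exceeds expectations")
  else if key = "Organization" then
    ("Organization is unclear, illogical, or ineffective",
     "Organization shows some structure but may be inconsistent or confusing",
     "Organization is generally clear with some minor logical inconsistencies",
     "Organization is clear and logical throughout most of the work",
     "Organization is clear, logical, and enhances the effectiveness of the work")
  else if key = "Evidence" then
    ("Little or no relevant evidence provided to support ideas",
     "Some evidence provided but may be limited, irrelevant, or misinterpreted",
     "Adequate evidence provided that generally supports ideas",
     "Sufficient, relevant evidence that effectively supports ideas",
     "Comprehensive, relevant evidence that strongly supports and enhances ideas")
  else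
    (criterion ++ " shows minimal competence or significant errors",
     criterion ++ " shows developing competence with notable errors or gaps",
     criterion ++ " shows adequate competence with some minor errors",
     criterion ++ " demonstrates proficient skill and solid understanding",
     criterion ++ " demonstrates exceptional skill and comprehensive understanding")

-- the descriptor sequence for n levels: segments concatenated, as in Source B
def pvSeq (lo slo mid shi hi : String) (n : Nat) : List String :=
  if n = 0 then []
  else if n = 1 then [lo]
  else [lo] ++ (if n > 2 then [slo] else []) ++ List.replicate (n - 4) mid
       ++ (if n > 3 then [shi] else []) ++ [hi]

def generate_performance_descriptors_py_alt (criterion : String) (level_labels : List String) (_assignment_type : String) (_grade_level : String) : List (String × String) :=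
  let f := pvFive criterion
  let n := level_labels.length
  let seq := pvSeq f.1 f.2.1 f.2.2.1 f.2.2.2.1 f.2.2.2.2 n
  -- dict(zip(level_labels, seq)): fold the zipped pairs into a dict
  ((level_labels.zip seq).foldl (fun d p => d.insert p.1 p.2) PySem.Dict.empty).items

-- ===== PRECONDITION & SPEC =====
def Spec_generate_performance_descriptors_py (criterion : String) (level_labels : List String) (assignment_type : String) (grade_level : String) (out : List (String × String)) : Prop := out = generate_performance_descriptors_py_alt criterion level_labels assignment_type grade_level
instance (criterion : String) (level_labels : List String) (assignment_type : String) (grade_level : String) (out : List (String × String)) : Decidable (Spec_generate_performance_descriptors_py criterion level_labels assignment_type grade_level out) := by unfold Spec_generate_performance_descriptors_py; infer_instance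

-- ===== CLAIM (what is proved, stated in full; the proofs are below) =====
def Claim_equal_generate_performance_descriptors_py : Prop := ∀ (criterion : String) (level_labels : List String) (assignment_type : String) (grade_level : String), Dom_generate_performance_descriptors_py criterion level_labels assignment_type grade_level → Spec_generate_performance_descriptors_py criterion level_labels assignment_type grade_level (generate_performance_descriptors_py criterion level_labels assignment_type grade_level)

-- ===== LEMMAS AND PROOFS =====
theorem pvSeq_length (lo slo mid shi hi : String) (n : Nat) :
    (pvSeq lo slo mid shi hi n).length = n := by
  unfold pvSeq
  split_ifs <;> simp_all <;> omega

-- the i-th element of B's sequence is exactly what A's five-way chain picks at index i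
theorem pvSeq_getElem? (lo slo mid shi hi : String) (n i : Nat) (h : i < n) :
    (pvSeq lo slo mid shi hi n)[i]? =
      some (if (i : Int) = 0 then lo
       else if (i : Int) = (n : Int) - 1 then hi
       else if (i : Int) = 1 ∧ (n : Int) > 2 then slo
       else if (i : Int) = (n : Int) - 2 then shi
       else mid) := by
  unfold pvSeq
  rcases Nat.lt_or_ge n 4 with h4 | h4
  · interval_cases n <;> interval_cases i <;> simp
  · have hn0 : ¬ n = 0 := by omega
    have hn1 : ¬ n = 1 := by omega
    have hgt2 : n > 2 := by omega
    have hgt3 : n > 3 := by omega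
    simp only [if_neg hn0, if_neg hn1, if_pos hgt2, if_pos hgt3]
    simp only [List.getElem?_append, List.length_append, List.length_replicate,
      List.length_cons, List.length_nil, List.getElem?_replicate,
      List.getElem?_cons, List.getElem?_nil]
    split_ifs <;> simp_all <;> omega

-- B's zipped pair list is A's enumerate-with-chain list
theorem pvZip_eq (lo slo mid shi hi : String) (l : List String) :
    l.zip (pvSeq lo slo mid shi hi l.length) =
      (PySem.List.enumerate l).map (fun p => (p.2,
        if p.1 = 0 then lo
        else if p.1 = (l.length : Int) - 1 then hi
        else if p.1 = 1 ∧ (l.length : Int) > 2 then slo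
        else if p.1 = (l.length : Int) - 2 then shi
        else mid)) := by
  apply List.ext_getElem
  · simp [pvSeq_length, PySem.List.length_enumerate]
  · intro i h1 h2
    have hil : i < l.length := by
      simp [pvSeq_length] at h1
      omega
    have hseq : i < (pvSeq lo slo mid shi hi l.length).length := by
      simpa [pvSeq_length] using hil
    rw [List.getElem_zip, List.getElem_map, PySem.List.getElem_enumerate]
    refine Prod.ext rfl ?_
    rw [List.getElem_eq_iff hseq, pvSeq_getElem? lo slo mid shi hi l.length i hil]
    simp

-- ===== VERDICT (by name: the statement is the Claim_ definition above) =====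
theorem generate_performance_descriptors_py_spec : Claim_equal_generate_performance_descriptors_py := by
  intro criterion level_labels assignment_type grade_level _
  unfold Spec_generate_performance_descriptors_py
  unfold generate_performance_descriptors_py generate_performance_descriptors_py_alt
  dsimp only
  congr 1
  rw [pvZip_eq, List.foldl_map]
  unfold pvFive
  by_cases h1 : criterion = "Content/Ideas" <;>
  by_cases h2 : criterion = "Content" <;>
  by_cases h3 : criterion = "Organization" <;>
  by_cases h4 : criterion = "Evidence/Support" <;>
  by_cases h5 : criterion = "Evidence" <;>
  simp_all
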